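-- pv_equiv track=rewrite | github.com/datacemia/legal-ai-agent | backend/app/services/contract_agent/summary_service.py | remove_alarmist_language
-- ===== SOURCE A (Python) =====
-- SUMMARY_SPECULATIVE_PATTERNS = [
--     "risques significatifs",
--     "significant risks",
--     "major legal exposure",
--     "dangerous contract",
--     "highly risky",
--     "serious legal risk",
--     "critical legal concern",
-- ]
--
-- def remove_alarmist_language(
--     data: dict,
--     contract_quality_score: int,
-- ) -> dict:
--
--     if contract_quality_score >= 60:
--         return data
--
--     fields = [
--         "global_summary",
--         "practical_decision",
--         "overall_balance",
--     ]
--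
--     for field in fields:
--
--         value = data.get(field, "")
--
--         lowered = value.lower()
--
--         for pattern in SUMMARY_SPECULATIVE_PATTERNS:
--
--             if pattern in lowered:
--
--                 value = value.replace(
--                     pattern,
--                     ""
--                 )
--
--         data[field] = " ".join(
--             value.split()
--         )
--
--     return data
-- ===== SOURCE B (Python) =====
-- SUMMARY_SPECULATIVE_PATTERNS = [
--     "risques significatifs",
--     "significant risks",
--     "major legal exposure",
--     "dangerous contract",
--     "highly risky",
--     "serious legal risk",
--     "critical legal concern",
-- ]
--
-- _SUMMARY_FIELDS = ("global_summary", "practical_decision", "overall_balance")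
--
--
-- def _without(text, phrase):
--     """text with every occurrence of phrase cut out, recursively from the first match."""
--     i = text.find(phrase)
--     if i < 0:
--         return text
--     return text[:i] + _without(text[i + len(phrase):], phrase)
--
--
-- def remove_alarmist_language(data, contract_quality_score):
--     if contract_quality_score >= 60:
--         return data
--     for field in _SUMMARY_FIELDS:
--         text = data.get(field, "")
--         # phrases are detected case-insensitively in the incoming text, then cut out verbatim
--         for phrase in [p for p in SUMMARY_SPECULATIVE_PATTERNS if p in text.lower()]:
--             text = _without(text, phrase)
--         data[field] = " ".join(text.split())
--     return data
-- ===== Notes on version B (the rewrite author's own statement) =====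
-- stated objective: alternative
-- what changed: B hoists the case-insensitive detection out of the removal loop (it iterates over the phrase list filtered once against the lowered incoming field text, which is also what A's once-computed `lowered` tests) and cuts the occurrences out with a recursive find-and-slice deletion helper instead of the conditional str.replace inside the pattern loop.
import Mathlib
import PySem

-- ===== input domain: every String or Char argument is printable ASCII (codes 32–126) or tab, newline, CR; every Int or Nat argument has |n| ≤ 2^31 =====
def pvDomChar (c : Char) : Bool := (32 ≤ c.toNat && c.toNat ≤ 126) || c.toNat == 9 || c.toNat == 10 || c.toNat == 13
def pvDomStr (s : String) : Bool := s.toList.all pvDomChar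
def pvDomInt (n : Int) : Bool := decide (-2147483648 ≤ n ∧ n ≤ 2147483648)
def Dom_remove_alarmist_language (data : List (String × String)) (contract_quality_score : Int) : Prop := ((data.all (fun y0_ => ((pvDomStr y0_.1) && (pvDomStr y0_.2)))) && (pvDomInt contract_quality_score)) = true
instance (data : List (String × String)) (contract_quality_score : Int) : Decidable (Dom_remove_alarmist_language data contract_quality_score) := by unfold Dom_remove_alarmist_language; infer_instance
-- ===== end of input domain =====

-- B hoists the case-insensitive phrase detection into one filter over the phrase list and removes
-- each detected phrase with a recursive find-and-slice helper instead of a conditional str.replace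
-- inside the loop (alternative decomposition; same cost). Both A and B mutate `data` in place the
-- same way; the equivalence proved here is about the returned dict.


-- ===== PORT A =====
def pvPatternsA : List String := ["risques significatifs", "significant risks", "major legal exposure", "dangerous contract", "highly risky", "serious legal risk", "critical legal concern"]

def pvFieldsA : List String := ["global_summary", "practical_decision", "overall_balance"]

def remove_alarmist_language (data : List (String × String)) (contract_quality_score : Int) : List (String × String) :=
  let d := PySem.Dict.ofList data
  if 60 ≤ contract_quality_score then d.items
  else
    (pvFieldsA.foldl (fun d field =>
        let value := PySem.Dict.getD d field ""
        let lowered := PySem.Str.lower value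
        let value := pvPatternsA.foldl (fun v p => if PySem.Str.isIn p lowered then PySem.Str.replace v p "" else v) value
        PySem.Dict.insert d field (PySem.Str.join " " (PySem.Str.split₀ value))) d).items

-- ===== PORT B =====
def pvPatternsB : List String := ["risques significatifs", "significant risks", "major legal exposure", "dangerous contract", "highly risky", "serious legal risk", "critical legal concern"]

def pvFieldsB : List String := ["global_summary", "practical_decision", "overall_balance"]

-- `_without` from Source B. In the recursive branch 0 ≤ i, so Python's `text[:i]` / `text[i+len(phrase):]`
-- are exactly take/drop; the fuel `= len(text)` only bounds the recursion depth (each call removes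
-- at least one character for the nonempty phrases used) and is never the returning branch on those.
def pvWithoutGo (p : List Char) : Nat → List Char → List Char
  | 0, text => text
  | fuel+1, text =>
      let i := PySem.Chars.find text p
      if i < 0 then text
      else text.take i.toNat ++ pvWithoutGo p fuel (text.drop (i.toNat + p.length))

def pvWithout (text phrase : String) : String :=
  String.ofList (pvWithoutGo phrase.toList text.toList.length text.toList)

def remove_alarmist_language_alt (data : List (String × String)) (contract_quality_score : Int) : List (String × String) :=
  let d := PySem.Dict.ofList data
  if 60 ≤ contract_quality_score then d.items
  else
    (pvFieldsB.foldl (fun d field =>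
        let text := PySem.Dict.getD d field ""
        let cleaned := (pvPatternsB.filter (fun p => PySem.Str.isIn p (PySem.Str.lower text))).foldl (fun t p => pvWithout t p) text
        PySem.Dict.insert d field (PySem.Str.join " " (PySem.Str.split₀ cleaned))) d).items

-- ===== PRECONDITION & SPEC =====
def Spec_remove_alarmist_language (data : List (String × String)) (contract_quality_score : Int) (out : List (String × String)) : Prop := out = remove_alarmist_language_alt data contract_quality_score
instance (data : List (String × String)) (contract_quality_score : Int) (out : List (String × String)) : Decidable (Spec_remove_alarmist_language data contract_quality_score out) := by unfold Spec_remove_alarmist_language; infer_instance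

-- ===== CLAIM (what is proved, stated in full; the proofs are below) =====
def Claim_equal_remove_alarmist_language : Prop := ∀ (data : List (String × String)) (contract_quality_score : Int), Dom_remove_alarmist_language data contract_quality_score → Spec_remove_alarmist_language data contract_quality_score (remove_alarmist_language data contract_quality_score)

-- ===== LEMMAS AND PROOFS =====

-- replace.go on a string with no occurrence of the pattern returns it unchanged
lemma pv_go_absent (p : List Char) :
    ∀ (fuel : Nat) (l acc : List Char), ¬ p <:+: l →
      PySem.Chars.replace.go p [] fuel l acc = acc.reverse ++ l := by
  intro fuel
  induction fuel with
  | zero => intro l acc h; simp [PySem.Chars.replace.go]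
  | succ n ih =>
      intro l acc h
      cases l with
      | nil => simp [PySem.Chars.replace.go]
      | cons c t =>
          simp only [PySem.Chars.replace.go]
          split
          · exact absurd (List.isPrefixOf_iff_prefix.mp (by assumption)).isInfix h
          · rw [ih t (c :: acc) (fun hin => h (hin.trans (List.suffix_cons c t).isInfix))]
            simp

-- the accumulator of replace.go factors out
lemma pv_go_acc (p : List Char) :
    ∀ (fuel : Nat) (l acc : List Char),
      PySem.Chars.replace.go p [] fuel l acc = acc.reverse ++ PySem.Chars.replace.go p [] fuel l [] := by
  intro fuel
  induction fuel with
  | zero => intro l acc; simp [PySem.Chars.replace.go]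
  | succ n ih =>
      intro l acc
      cases l with
      | nil => simp [PySem.Chars.replace.go]
      | cons c t =>
          simp only [PySem.Chars.replace.go]
          split
          · show PySem.Chars.replace.go p [] n _ acc = _
            rw [ih _ acc]
            show _ = acc.reverse ++ PySem.Chars.replace.go p [] n _ []
            rfl
          · rw [ih t (c :: acc), ih t [c]]; simp

lemma pv_go_mono (p : List Char) (hp : p ≠ []) :
    ∀ (fuel : Nat) (l acc : List Char), l.length ≤ fuel →
      PySem.Chars.replace.go p [] (fuel + 1) l acc = PySem.Chars.replace.go p [] fuel l acc := by
  intro fuel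
  induction fuel with
  | zero =>
      intro l acc hl
      have : l = [] := List.eq_nil_of_length_eq_zero (Nat.le_zero.mp hl)
      subst this
      simp [PySem.Chars.replace.go]
  | succ n ih =>
      intro l acc hl
      cases l with
      | nil => simp [PySem.Chars.replace.go]
      | cons c t =>
          simp only [PySem.Chars.replace.go]
          split
          · apply ih
            have hs : 0 < p.length := List.length_pos_of_ne_nil hp
            have := List.length_drop (l := c :: t) (i := p.length)
            simp at hl ⊢
            omega
          · apply ih
            simp at hl
            omega

lemma pv_go_fuel (p : List Char) (hp : p ≠ []) :
    ∀ (fuel : Nat) (l acc : List Char), l.length ≤ fuel →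
      PySem.Chars.replace.go p [] fuel l acc = PySem.Chars.replace.go p [] l.length l acc := by
  intro fuel l acc hl
  obtain ⟨d, rfl⟩ : ∃ d, fuel = l.length + d := ⟨fuel - l.length, by omega⟩
  clear hl
  induction d with
  | zero => rfl
  | succ k ih => rw [show l.length + (k + 1) = (l.length + k) + 1 from rfl,
      pv_go_mono p hp _ l acc (by omega), ih]

-- deleting a pattern splits at its first occurrence
lemma pv_replace_split (p : List Char) (hp : p ≠ []) :
    ∀ (n : Nat) (t : List Char), p <+: t.drop n → (∀ j < n, ¬ p <+: t.drop j) →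
      PySem.Chars.replace t p [] = t.take n ++ PySem.Chars.replace (t.drop (n + p.length)) p [] := by
  intro n
  induction n with
  | zero =>
      intro t hpre _
      simp only [List.drop_zero] at hpre
      cases t with
      | nil =>
          exact absurd (List.prefix_nil.mp hpre) hp
      | cons c t' =>
          have hemp : p.isEmpty = false := by simpa [List.isEmpty_iff] using hp
          simp only [PySem.Chars.replace, hemp, Bool.false_eq_true, if_false]
          simp only [PySem.Chars.replace.go, List.length_cons,
            List.isPrefixOf_iff_prefix.mpr hpre, if_pos]
          rw [pv_go_fuel p hp t'.length _ _ (by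
            have := List.length_drop (l := c :: t') (i := p.length)
            have : 0 < p.length := List.length_pos_of_ne_nil hp
            simp
            omega)]
          simp
  | succ n ih =>
      intro t hpre hmin
      cases t with
      | nil => exact absurd (List.prefix_nil.mp (by simpa using hpre)) hp
      | cons c t' =>
          have hemp : p.isEmpty = false := by simpa [List.isEmpty_iff] using hp
          have h0 : ¬ p <+: (c :: t') := by simpa using hmin 0 (Nat.succ_pos n)
          have h0' : p.isPrefixOf (c :: t') = false := by
            rw [Bool.eq_false_iff]
            intro hb
            exact h0 (List.isPrefixOf_iff_prefix.mp hb)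
          simp only [PySem.Chars.replace, hemp, Bool.false_eq_true, if_false]
          simp only [PySem.Chars.replace.go, List.length_cons, h0', Bool.false_eq_true, if_false]
          rw [pv_go_acc p t'.length t' [c]]
          have iht := ih t' (by simpa using hpre) (fun j hj => by simpa using hmin (j+1) (by omega))
          simp only [PySem.Chars.replace, hemp, Bool.false_eq_true, if_false] at iht
          rw [iht]
          simp [Nat.add_right_comm]

-- Source B's recursive deletion computes exactly Python's value.replace(phrase, "")
lemma pv_withoutGo_eq (p : List Char) (hp : p ≠ []) :
    ∀ (fuel : Nat) (l : List Char), l.length ≤ fuel →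
      pvWithoutGo p fuel l = PySem.Chars.replace l p [] := by
  intro fuel
  induction fuel with
  | zero =>
      intro l hl
      have : l = [] := List.eq_nil_of_length_eq_zero (Nat.le_zero.mp hl)
      subst this
      simp [pvWithoutGo, PySem.Chars.replace, PySem.Chars.replace.go,
        show p.isEmpty = false by simpa [List.isEmpty_iff] using hp]
  | succ f ih =>
      intro l hl
      simp only [pvWithoutGo]
      by_cases hneg : PySem.Chars.find l p < 0
      · have hm1 : PySem.Chars.find l p = -1 := by
          have := PySem.Chars.neg_one_le_find (s := l) (sub := p)
          omega
        have habs : ¬ p <:+: l := (PySem.Chars.find_eq_neg_one_iff l p).mp hm1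
        rw [if_pos hneg]
        have hemp : p.isEmpty = false := by simpa [List.isEmpty_iff] using hp
        simp only [PySem.Chars.replace, hemp, Bool.false_eq_true, if_false]
        rw [pv_go_absent p l.length l [] habs]
        simp
      · rw [if_neg hneg]
        have h0 : 0 ≤ PySem.Chars.find l p := by omega
        obtain ⟨hpre, hmin⟩ := PySem.Chars.find_spec (s := l) (sub := p) h0
        set n := (PySem.Chars.find l p).toNat with hn
        rw [pv_replace_split p hp n l hpre hmin]
        congr 1
        apply ih
        have hple : 0 < p.length := List.length_pos_of_ne_nil hp
        have hfind_le := PySem.Chars.find_le_length (s := l) (sub := p)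
        have hn_le : n ≤ l.length := by omega
        rw [List.length_drop]
        omega

lemma pv_without_eq_replace (t p : String) (hp : p.toList ≠ []) :
    pvWithout t p = PySem.Str.replace t p "" := by
  simp only [pvWithout, PySem.Str.replace, String.toList_empty]
  rw [pv_withoutGo_eq p.toList hp t.toList.length t.toList (le_refl _)]

-- per field: B's filter-then-delete equals A's conditional replace (both test the original lowered text)
lemma pv_scrub_eq (v : String) :
    (pvPatternsB.filter (fun p => PySem.Str.isIn p (PySem.Str.lower v))).foldl (fun t p => pvWithout t p) v
      = pvPatternsA.foldl (fun t p => if PySem.Str.isIn p (PySem.Str.lower v) then PySem.Str.replace t p "" else t) v := by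
  rw [List.foldl_filter, show pvPatternsB = pvPatternsA from rfl,
    PySem.List.foldl_congr_mem pvPatternsA _
      (fun t p => if PySem.Str.isIn p (PySem.Str.lower v) = true then PySem.Str.replace t p "" else t) v
      (by
        intro acc x hx
        have hx' : x.toList ≠ [] := by
          simp only [pvPatternsA] at hx
          fin_cases hx <;> decide
        simp only [pv_without_eq_replace acc x hx'])]

lemma pv_getD_ins (d : PySem.Dict String String) {k k' : String} (v : String) (h : k' ≠ k) :
    (d.insert k v).getD k' "" = d.getD k' "" := by
  simp [PySem.Dict.getD, PySem.Dict.get?_insert_of_ne d v h]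

-- ===== VERDICT (by name: the statement is the Claim_ definition above) =====
set_option maxHeartbeats 1000000 in
theorem remove_alarmist_language_spec : Claim_equal_remove_alarmist_language := by
  intro data score _
  unfold Spec_remove_alarmist_language remove_alarmist_language remove_alarmist_language_alt
  by_cases h : 60 ≤ score
  · simp only [if_pos h]
  · simp only [if_neg h]
    refine congrArg PySem.Dict.items ?_
    simp only [pvFieldsA, pvFieldsB, List.foldl_cons, List.foldl_nil]
    rw [pv_scrub_eq, pv_scrub_eq, pv_scrub_eq,
      pv_getD_ins _ _ (by decide),
      pv_getD_ins _ _ (by decide), pv_getD_ins _ _ (by decide)]
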